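-- pv_equiv track=rewrite | github.com/SomaNews/somanews-script | labs/cnouns.py | morphs_ngrams_without_tag
-- ===== SOURCE A (Python) =====
-- def test_special_ch(typ):
--     return typ == u'SF' or typ == u'SE' or typ == u'SSO' or typ == u'SSC' or typ == u'SC' or typ == u'SY'
--
-- def morphs_ngrams_without_tag(inp_pos, max_n):
--     results = []
--     for n in range(1, max_n + 1):
--         ngrams = zip(*[inp_pos[i:] for i in range(n)])
--         for ngram in ngrams:
--             if(all([not test_special_ch(e[1]) for e in ngram])):
--                 results = results + [''.join(e[0] for e in ngram)]
--     return results
-- ===== SOURCE B (Python) =====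
-- def test_special_ch(typ):
--     return typ == u'SF' or typ == u'SE' or typ == u'SSO' or typ == u'SSC' or typ == u'SC' or typ == u'SY'
--
--
-- def _split_runs(inp_pos):
--     # maximal runs of consecutive non-special-tagged elements, left to right
--     runs, cur = [], []
--     for e in inp_pos:
--         if test_special_ch(e[1]):
--             runs.append(cur)
--             cur = []
--         else:
--             cur.append(e)
--     runs.append(cur)
--     return runs
--
--
-- def morphs_ngrams_without_tag(inp_pos, max_n):
--     runs = _split_runs(inp_pos)
--     results = []
--     for n in range(1, max_n + 1):
--         for run in runs:
--             seg = run
--             while len(seg) >= n: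
--                 results.append(''.join(e[0] for e in seg[:n]))
--                 seg = seg[1:]
--     return results
-- ===== Notes on version B (the rewrite author's own statement) =====
-- stated objective: faster
-- what changed: B first splits inp_pos into maximal runs of non-special-tagged elements, then for each n slides a window over each run, eliminating the per-window all()-special-tag check and the zip(*[inp_pos[i:] for i in range(n)]) slice construction entirely.
import Mathlib
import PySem

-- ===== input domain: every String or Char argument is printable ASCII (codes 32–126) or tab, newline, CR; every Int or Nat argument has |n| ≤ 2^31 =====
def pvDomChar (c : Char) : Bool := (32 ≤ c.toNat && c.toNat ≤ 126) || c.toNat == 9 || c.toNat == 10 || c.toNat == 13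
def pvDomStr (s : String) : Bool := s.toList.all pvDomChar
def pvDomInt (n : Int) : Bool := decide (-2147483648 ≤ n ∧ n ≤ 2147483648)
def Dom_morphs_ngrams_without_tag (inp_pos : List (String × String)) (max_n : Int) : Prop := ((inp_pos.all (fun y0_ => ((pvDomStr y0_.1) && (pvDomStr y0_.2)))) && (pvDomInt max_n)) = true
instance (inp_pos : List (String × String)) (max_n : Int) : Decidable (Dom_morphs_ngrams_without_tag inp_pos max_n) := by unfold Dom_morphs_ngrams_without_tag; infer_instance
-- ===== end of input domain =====

-- B splits the input into maximal runs of non-special-tagged elements and slides windows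
-- over each run, removing A's per-window special-tag check and zip(*slices) construction
-- (objective: alternative decomposition; neither version mutates its input).

-- ===== PORT A =====
def test_special_ch (typ : String) : Bool :=
  typ == "SF" || typ == "SE" || typ == "SSO" || typ == "SSC" || typ == "SC" || typ == "SY"

-- zip(*lists): stop as soon as some list is empty; otherwise emit the heads, recurse on tails
def pvZipStar {α : Type} (ls : List (List α)) : List (List α) :=
  if h : ls ≠ [] ∧ ls.all (fun l => !l.isEmpty) then
    ls.filterMap List.head? :: pvZipStar (ls.map List.tail)
  else []
termination_by (ls.headD []).length
decreasing_by
  cases ls with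
  | nil => exact absurd rfl h.1
  | cons a as =>
    have ha : a ≠ [] := by
      have h2 := h.2; simp only [List.all_cons, Bool.and_eq_true] at h2
      simpa [List.isEmpty_iff] using h2.1
    simp only [List.map_cons, List.headD_cons, List.length_tail]
    have := List.length_pos_of_ne_nil ha
    omega

def morphs_ngrams_without_tag (inp_pos : List (String × String)) (max_n : Int) : List String :=
  (PySem.List.pyRange 1 (max_n + 1) 1).foldl (fun results n =>
    let ngrams := pvZipStar ((PySem.List.pyRange 0 n 1).map
      (fun i => PySem.List.slice inp_pos (some i) none))
    ngrams.foldl (fun results ngram =>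
      if (ngram.map (fun e => !test_special_ch e.2)).all (fun b => b) then
        results ++ [PySem.Str.join "" (ngram.map (fun e => e.1))]
      else results) results) []

-- ===== PORT B =====
def pvSplitRuns (inp_pos : List (String × String)) : List (List (String × String)) :=
  let st := inp_pos.foldl
    (fun (st : List (List (String × String)) × List (String × String)) e =>
      if test_special_ch e.2 then (st.1 ++ [st.2], []) else (st.1, st.2 ++ [e]))
    ([], [])
  st.1 ++ [st.2]

-- the 'while len(seg) >= n' loop of B; the 'n ≤ 0' disjunct only serves termination
-- (B calls this with n ≥ 1 only, where the guard agrees with Python's 'len(seg) >= n')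
def pvEmitRun (n : Int) (results : List String) (seg : List (String × String)) : List String :=
  if h : n ≤ 0 ∨ (seg.length : Int) < n then results
  else
    pvEmitRun n
      (results ++ [PySem.Str.join "" ((PySem.List.slice seg none (some n)).map (fun e => e.1))])
      (PySem.List.slice seg (some 1) none)
termination_by seg.length
decreasing_by
  rw [PySem.List.slice_from_one]
  have hne : seg ≠ [] := by
    intro hnil; subst hnil; simp at h; omega
  have := List.length_pos_of_ne_nil hne
  simp only [List.length_tail]
  omega

def morphs_ngrams_without_tag_alt (inp_pos : List (String × String)) (max_n : Int) : List String :=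
  let runs := pvSplitRuns inp_pos
  (PySem.List.pyRange 1 (max_n + 1) 1).foldl (fun results n =>
    runs.foldl (fun results run => pvEmitRun n results run) results) []

-- ===== PRECONDITION & SPEC =====
def Spec_morphs_ngrams_without_tag (inp_pos : List (String × String)) (max_n : Int) (out : List String) : Prop := out = morphs_ngrams_without_tag_alt inp_pos max_n
instance (inp_pos : List (String × String)) (max_n : Int) (out : List String) : Decidable (Spec_morphs_ngrams_without_tag inp_pos max_n out) := by unfold Spec_morphs_ngrams_without_tag; infer_instance

-- ===== CLAIM (what is proved, stated in full; the proofs are below) =====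
def Claim_equal_morphs_ngrams_without_tag : Prop := ∀ (inp_pos : List (String × String)) (max_n : Int), Dom_morphs_ngrams_without_tag inp_pos max_n → Spec_morphs_ngrams_without_tag inp_pos max_n (morphs_ngrams_without_tag inp_pos max_n)

-- ===== LEMMAS AND PROOFS =====

-- structural windows of length m (used only with 1 ≤ m)
def pvWin (m : Nat) : List (String × String) → List (List (String × String))
  | [] => []
  | e :: t => if (e :: t).length < m then [] else (e :: t).take m :: pvWin m t

-- recursive description of the runs
def pvRuns : List (String × String) → List (List (String × String))
  | [] => [[]]
  | e :: t =>
    if test_special_ch e.2 then [] :: pvRuns t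
    else
      match pvRuns t with
      | [] => [[e]]
      | r :: rs => (e :: r) :: rs

theorem pvRuns_ne_nil (t : List (String × String)) : pvRuns t ≠ [] := by
  cases t with
  | nil => simp [pvRuns]
  | cons e t =>
    simp only [pvRuns]
    split
    · simp
    · split <;> simp

theorem pvSplitRuns_invariant (xs : List (String × String))
    (runs0 : List (List (String × String))) (cur0 : List (String × String)) :
    (let st := xs.foldl
      (fun (st : List (List (String × String)) × List (String × String)) e =>
        if test_special_ch e.2 then (st.1 ++ [st.2], []) else (st.1, st.2 ++ [e]))
      (runs0, cur0)
     st.1 ++ [st.2]) = runs0 ++ (pvRuns xs).modifyHead (cur0 ++ ·) := by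
  induction xs generalizing runs0 cur0 with
  | nil => simp [pvRuns]
  | cons e t ih =>
    simp only [List.foldl_cons, pvRuns]
    by_cases hs : test_special_ch e.2 = true
    · simp only [hs, if_true]
      rw [ih]
      simp only [List.modifyHead_cons, List.append_nil]
      rcases pvRuns t with _ | ⟨r, rs⟩ <;> simp
    · simp only [hs, Bool.false_eq_true, if_false]
      rw [ih]
      rcases h : pvRuns t with _ | ⟨r, rs⟩
      · exact absurd h (pvRuns_ne_nil t)
      · simp

theorem pvSplitRuns_eq (xs : List (String × String)) :
    pvSplitRuns xs = pvRuns xs := by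
  have h := pvSplitRuns_invariant xs [] []
  simp only [pvSplitRuns]
  rw [h]
  rcases hr : pvRuns xs with _ | ⟨r, rs⟩
  · exact absurd hr (pvRuns_ne_nil xs)
  · simp

-- join of the surfaces of one window
def pvJoin (w : List (String × String)) : String :=
  PySem.Str.join "" (w.map (fun e => e.1))

-- B's while loop emits the windows of one run
theorem pvEmitRun_eq (n : Int) (hn : 1 ≤ n) (seg : List (String × String))
    (res : List String) :
    pvEmitRun n res seg = res ++ (pvWin n.toNat seg).map pvJoin := by
  suffices H : ∀ k, ∀ seg : List (String × String), seg.length ≤ k → ∀ res : List String,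
      pvEmitRun n res seg = res ++ (pvWin n.toNat seg).map pvJoin from
    H seg.length seg le_rfl res
  intro k
  induction k with
  | zero =>
    intro seg hk res
    have hseg : seg = [] := List.length_eq_zero_iff.1 (by omega)
    subst hseg
    rw [pvEmitRun, dif_pos (Or.inr (by simp; omega))]
    simp [pvWin]
  | succ k ih =>
    intro seg hk res
    rw [pvEmitRun]
    by_cases hlt : (seg.length : Int) < n
    · rw [dif_pos (Or.inr hlt)]
      have hsh : seg.length < n.toNat := by omega
      cases seg with
      | nil => simp [pvWin]
      | cons a t => rw [pvWin, if_pos hsh]; simp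
    · rw [dif_neg (by omega)]
      cases seg with
      | nil => simp at hlt; omega
      | cons a t =>
        rw [PySem.List.slice_from_one]
        simp only [List.tail_cons]
        rw [show PySem.List.slice (a :: t) none (some n) = (a :: t).take n.toNat from
          PySem.List.slice_to _ (by omega)]
        rw [ih t (by simpa using Nat.lt_succ_iff.mp (by simpa using hk)) _]
        rw [pvWin, if_neg (by simpa using hlt)]
        simp [pvJoin]

-- (range m).filterMap getElem? is take m
theorem pvFilterMap_range_getElem (m : Nat) (xs : List (String × String)) :
    (List.range m).filterMap (fun k => xs[k]?) = xs.take m := by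
  induction m with
  | zero => simp
  | succ m ih =>
    rw [List.range_succ, List.filterMap_append, ih, List.take_add_one]
    cases h : xs[m]? <;> simp [h]

-- A's zip(*[xs[i:] for i in range(n)]) computes the structural windows
theorem pvZipStar_eq (m : Nat) (hm : 1 ≤ m) (xs : List (String × String)) :
    pvZipStar ((List.range m).map (fun k => xs.drop k)) = pvWin m xs := by
  induction xs with
  | nil =>
    rw [pvZipStar, dif_neg]
    · cases m with
      | zero => omega
      | succ m => simp [pvWin]
    · rintro ⟨h1, h2⟩
      simp only [List.all_eq_true] at h2
      have hmem : (m - 1) ∈ List.range m := by simp; omega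
      have := h2 _ (List.mem_map_of_mem hmem)
      simp at this
  | cons a t ih =>
    by_cases hlen : (a :: t).length < m
    · rw [pvZipStar, dif_neg, pvWin, if_pos hlen]
      rintro ⟨h1, h2⟩
      simp only [List.all_eq_true] at h2
      have hmem : (m - 1) ∈ List.range m := by simp; omega
      have h3 := h2 _ (List.mem_map_of_mem hmem)
      rw [Bool.not_eq_eq_eq_not, Bool.not_true, List.isEmpty_eq_false_iff,
        ← List.length_pos_iff] at h3
      simp only [List.length_drop, List.length_cons] at h3
      simp only [List.length_cons] at hlen
      omega
    · have hcond : ((List.range m).map (fun k => (a :: t).drop k)) ≠ [] ∧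
          (((List.range m).map (fun k => (a :: t).drop k)).all (fun l => !l.isEmpty)) = true := by
        constructor
        · cases m with
          | zero => omega
          | succ m => simp [List.range_succ_eq_map]
        · simp only [List.all_eq_true]
          intro l hl
          simp only [List.mem_map, List.mem_range] at hl
          obtain ⟨k, hk, rfl⟩ := hl
          rw [Bool.not_eq_eq_eq_not, Bool.not_true, List.isEmpty_eq_false_iff,
            ← List.length_pos_iff]
          simp only [List.length_drop, List.length_cons]
          simp only [List.length_cons] at hlen
          omega
      rw [pvZipStar, dif_pos hcond, pvWin, if_neg hlen]
      congr 1
      · rw [List.filterMap_map]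
        have heq : ∀ k, (List.head? ∘ fun k => (a :: t).drop k) k = (a :: t)[k]? := by
          intro k; simp [List.head?_drop]
        rw [funext heq, pvFilterMap_range_getElem]
      · rw [List.map_map]
        have heq : ∀ k ∈ List.range m, (List.tail ∘ fun k => (a :: t).drop k) k = t.drop k := by
          intro k _; simp [List.tail_drop]
        rw [List.map_congr_left heq]
        exact ih

-- the head run: a non-special prefix followed by nothing or a special element
theorem pvRuns_head_spec (t : List (String × String)) :
    ∀ r rs, pvRuns t = r :: rs →
      r.all (fun e => !test_special_ch e.2) = true ∧
      (t = r ∨ ∃ s t'', t = r ++ s :: t'' ∧ test_special_ch s.2 = true) := by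
  induction t with
  | nil =>
    intro r rs h
    simp only [pvRuns, List.cons.injEq] at h
    obtain ⟨h1, -⟩ := h
    subst h1
    exact ⟨rfl, Or.inl rfl⟩
  | cons e t ih =>
    intro r rs h
    simp only [pvRuns] at h
    by_cases hs : test_special_ch e.2 = true
    · rw [if_pos hs] at h
      obtain ⟨rfl, -⟩ : ([] : List (String × String)) = r ∧ pvRuns t = rs := by
        cases h; exact ⟨rfl, rfl⟩
      exact ⟨by simp, Or.inr ⟨e, t, by simp, hs⟩⟩
    · rw [if_neg hs] at h
      rcases hruns : pvRuns t with _ | ⟨r', rs'⟩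
      · exact absurd hruns (pvRuns_ne_nil t)
      · rw [hruns] at h
        obtain ⟨rfl, rfl⟩ : (e :: r') = r ∧ rs' = rs := by cases h; exact ⟨rfl, rfl⟩
        obtain ⟨h1, h2⟩ := ih r' rs' hruns
        refine ⟨by simp [h1, hs], ?_⟩
        rcases h2 with rfl | ⟨s, t'', rfl, hsp⟩
        · exact Or.inl rfl
        · exact Or.inr ⟨s, t'', by simp, hsp⟩

-- window predicate: no special tag inside the window
def pvOK (w : List (String × String)) : Bool := w.all (fun e => !test_special_ch e.2)

theorem pvWin_nil_of_short (m : Nat) (xs : List (String × String)) (h : xs.length < m) :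
    pvWin m xs = [] := by
  cases xs with
  | nil => simp [pvWin]
  | cons a t => rw [pvWin, if_pos h]

theorem pvWin_cons_long (m : Nat) (e : String × String) (r : List (String × String))
    (h : ¬ (e :: r).length < m) :
    pvWin m (e :: r) = (e :: r).take m :: pvWin m r := by
  rw [pvWin, if_neg h]

-- core: filtering A's windows = windows of B's runs, concatenated in order
theorem pvCore (m : Nat) (hm : 1 ≤ m) (xs : List (String × String)) :
    (pvWin m xs).filter pvOK = (pvRuns xs).flatMap (pvWin m) := by
  induction xs with
  | nil => simp [pvWin, pvRuns]
  | cons e t ih =>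
    rcases hruns : pvRuns t with _ | ⟨r, rs⟩
    · exact absurd hruns (pvRuns_ne_nil t)
    rw [hruns] at ih
    obtain ⟨hrall, hrdec⟩ := pvRuns_head_spec t r rs hruns
    have hrpre : r.length ≤ t.length := by
      rcases hrdec with rfl | ⟨s, t'', rfl, _⟩ <;> simp
    simp only [pvRuns]
    by_cases hs : test_special_ch e.2 = true
    · rw [if_pos hs]
      have hL : (pvWin m (e :: t)).filter pvOK = (pvWin m t).filter pvOK := by
        by_cases hlen : (e :: t).length < m
        · rw [pvWin_nil_of_short m _ hlen, pvWin_nil_of_short m t (by simp at hlen ⊢; omega)]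
        · rw [pvWin, if_neg hlen, List.filter_cons]
          have hok : pvOK ((e :: t).take m) = false := by
            cases m with
            | zero => omega
            | succ m => simp [pvOK, List.take_succ_cons, hs]
          rw [hok]
          simp
      rw [hL, ih, hruns]
      simp only [List.flatMap_cons]
      have h0 : pvWin m ([] : List (String × String)) = [] := rfl
      rw [h0, List.nil_append]
    · rw [if_neg hs, hruns]
      by_cases hlen : (e :: t).length < m
      · rw [pvWin_nil_of_short m _ hlen]
        have ht : (pvWin m t).filter pvOK = [] := by
          rw [pvWin_nil_of_short m t (by simp at hlen ⊢; omega)]; rfl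
        rw [ht] at ih
        have hrw : pvWin m r = [] := pvWin_nil_of_short m r (by simp at hlen; omega)
        have hflat : rs.flatMap (pvWin m) = [] := by
          have h2 := ih.symm
          rw [List.flatMap_cons, hrw, List.nil_append] at h2
          exact h2
        simp [hflat, pvWin_nil_of_short m (e :: r) (by simp at hlen ⊢; omega)]
      · rw [pvWin, if_neg hlen, List.filter_cons]
        by_cases hfit : (e :: r).length < m
        · -- the head window of e::t crosses the special boundary: it is filtered out
          have hwr : pvWin m (e :: r) = [] := pvWin_nil_of_short m (e :: r) hfit
          rcases hrdec with rfl | ⟨s, t'', rfl, hsp⟩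
          · simp at hlen hfit; omega
          · have hok : pvOK ((e :: (r ++ s :: t'')).take m) = false := by
              cases m with
              | zero => omega
              | succ m =>
                have hms : r.length + 1 ≤ m := by simp at hfit; omega
                rw [List.take_succ_cons, List.take_append,
                  List.take_of_length_le (by omega), List.take_cons (by omega)]
                simp [pvOK, hsp]
            rw [hok]
            simp only [Bool.false_eq_true, if_false]
            rw [ih, List.flatMap_cons, List.flatMap_cons, hwr,
              pvWin_nil_of_short m r (by simp at hfit; omega)]
        · -- the head window stays inside e :: r and is kept
          have hww : (e :: t).take m = (e :: r).take m := by
            cases m with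
            | zero => omega
            | succ m =>
              rw [List.take_succ_cons, List.take_succ_cons]
              rcases hrdec with rfl | ⟨s, t'', rfl, _⟩
              · rfl
              · rw [List.take_append_of_le_length (by simp at hfit; omega)]
          have hok : pvOK ((e :: t).take m) = true := by
            rw [hww]
            cases m with
            | zero => omega
            | succ m =>
              rw [List.take_succ_cons]
              simp only [pvOK, List.all_cons, Bool.and_eq_true]
              refine ⟨by simp [hs], ?_⟩
              simp only [List.all_eq_true] at hrall ⊢
              exact fun e' he' => hrall e' (List.mem_of_mem_take he')
          rw [hok]
          simp only [if_true]
          rw [ih]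
          simp only [List.flatMap_cons]
          rw [pvWin_cons_long m e r hfit, ← hww]
          simp

-- A's inner loop for one n
theorem pvStepA (xs : List (String × String)) (n : Int) (hn : 1 ≤ n) (res : List String) :
    (pvZipStar ((PySem.List.pyRange 0 n 1).map
        (fun i => PySem.List.slice xs (some i) none))).foldl
      (fun results ngram =>
        if (ngram.map (fun e => !test_special_ch e.2)).all (fun b => b) then
          results ++ [PySem.Str.join "" (ngram.map (fun e => e.1))]
        else results) res
      = res ++ ((pvWin n.toNat xs).filter pvOK).map pvJoin := by
  have hlist : (PySem.List.pyRange 0 n 1).map (fun i => PySem.List.slice xs (some i) none)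
      = (List.range n.toNat).map (fun k => xs.drop k) := by
    rw [PySem.List.pyRange_one, List.map_map]
    simp only [Int.sub_zero]
    refine List.map_congr_left ?_
    intro k _
    simp [PySem.List.slice_from_natCast]
  rw [hlist, pvZipStar_eq n.toNat (by omega) xs]
  rw [PySem.List.foldl_append_if]
  have hfil : (pvWin n.toNat xs).filter
        (fun ngram => (ngram.map (fun e => !test_special_ch e.2)).all (fun b => b))
      = (pvWin n.toNat xs).filter pvOK :=
    List.filter_congr (fun w _ => by simp [pvOK, List.all_map, Function.comp_def])
  rw [hfil]
  rfl

-- B's loop over the runs for one n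
theorem pvStepB (runs : List (List (String × String))) (n : Int) (hn : 1 ≤ n)
    (res : List String) :
    runs.foldl (fun results run => pvEmitRun n results run) res
      = res ++ runs.flatMap (fun run => (pvWin n.toNat run).map pvJoin) := by
  calc runs.foldl (fun results run => pvEmitRun n results run) res
      = runs.foldl (fun results run => results ++ (pvWin n.toNat run).map pvJoin) res :=
        PySem.List.foldl_congr_mem runs _ _ res
          (fun acc run _ => pvEmitRun_eq n hn run acc)
    _ = res ++ runs.flatMap (fun run => (pvWin n.toNat run).map pvJoin) :=
        PySem.List.foldl_append_eq_flatMap _ _ _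

-- ===== VERDICT (by name: the statement is the Claim_ definition above) =====
theorem morphs_ngrams_without_tag_spec : Claim_equal_morphs_ngrams_without_tag := by
  intro inp_pos max_n _
  show morphs_ngrams_without_tag inp_pos max_n = morphs_ngrams_without_tag_alt inp_pos max_n
  unfold morphs_ngrams_without_tag morphs_ngrams_without_tag_alt
  rw [pvSplitRuns_eq]
  refine PySem.List.foldl_congr_mem _ _ _ _ ?_
  intro acc n hmem
  have hn : 1 ≤ n := ((PySem.List.mem_pyRange_one).1 hmem).1
  simp only
  rw [pvStepA inp_pos n hn acc, pvStepB (pvRuns inp_pos) n hn acc]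
  rw [pvCore n.toNat (by omega) inp_pos]
  rw [List.map_flatMap]
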